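-- pv_equiv track=rewrite | github.com/flexcompute/flow360 | flow360/component/results/case_results.py | _filter_headers_by_prefix
-- ===== SOURCE A (Python) =====
-- from typing import Callable, Dict, List, Optional
--
-- def _filter_headers_by_prefix(
--     headers: List[str], include: Optional[List[str]] = None, exclude: Optional[List[str]] = None
-- ) -> List[str]:
--     """
--     Filters headers based on provided include and exclude prefix lists.
--
--     Parameters
--     ----------
--     headers : List[str]
--         List of headers to filter.
--     include : Optional[List[str]]
--         List of prefixes to include in the result. If None, includes all.
--     exclude : Optional[List[str]]
--         List of prefixes to exclude from the result. If None, excludes none.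
--
--     Returns
--     -------
--     List[str]
--         Filtered list of headers.
--     """
--     if include:
--         headers = [
--             header for header in headers if any(header.startswith(prefix) for prefix in include)
--         ]
--
--     if exclude:
--         headers = [
--             header for header in headers if not any(header.startswith(prefix) for prefix in exclude)
--         ]
--
--     return headers
-- ===== SOURCE B (Python) =====
-- from typing import List, Optional
--
-- def _filter_headers_by_prefix(
--     headers: List[str], include: Optional[List[str]] = None, exclude: Optional[List[str]] = None
-- ) -> List[str]:
--     """Single pass: evaluate both prefix predicates per header, keep order, no mutation."""
--     do_include = bool(include)
--     do_exclude = bool(exclude)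
--     result = []
--     for header in headers:
--         if do_include and not any(header.startswith(p) for p in include):
--             continue
--         if do_exclude and any(header.startswith(p) for p in exclude):
--             continue
--         result.append(header)
--     return result
-- ===== Notes on version B (the rewrite author's own statement) =====
-- stated objective: simpler
-- what changed: Replaces A's two sequential list-comprehension filtering passes (and rebinding of headers) with a single explicit loop that tests both prefix predicates per header and appends survivors to an accumulator.
import Mathlib
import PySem

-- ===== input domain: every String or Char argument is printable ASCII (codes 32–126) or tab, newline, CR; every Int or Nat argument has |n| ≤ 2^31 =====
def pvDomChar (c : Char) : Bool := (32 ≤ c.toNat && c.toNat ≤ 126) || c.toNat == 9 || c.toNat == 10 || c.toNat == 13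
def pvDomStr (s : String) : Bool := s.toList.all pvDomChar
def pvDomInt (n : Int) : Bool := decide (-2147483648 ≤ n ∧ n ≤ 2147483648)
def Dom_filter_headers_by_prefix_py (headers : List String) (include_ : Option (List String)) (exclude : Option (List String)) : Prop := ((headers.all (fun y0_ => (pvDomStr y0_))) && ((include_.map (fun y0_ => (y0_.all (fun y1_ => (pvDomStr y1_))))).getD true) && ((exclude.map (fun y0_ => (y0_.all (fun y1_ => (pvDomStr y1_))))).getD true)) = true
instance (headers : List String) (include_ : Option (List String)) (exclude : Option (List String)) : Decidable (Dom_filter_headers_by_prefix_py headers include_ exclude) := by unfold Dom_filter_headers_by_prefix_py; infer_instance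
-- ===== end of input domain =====

-- B replaces A's two sequential filtering passes with one explicit accumulator loop testing both predicates per header (simpler decomposition, same cost).


-- ===== PORT A =====
-- Python truthiness of an Optional[List[str]]: None and [] are falsy
def pvTruthy (o : Option (List String)) : Bool :=
  match o with
  | none => false
  | some l => !l.isEmpty

def filter_headers_by_prefix_py (headers : List String) (include_ : Option (List String)) (exclude : Option (List String)) : List String :=
  -- if include: headers = [h for h in headers if any(h.startswith(p) for p in include)]
  let headers1 :=
    if pvTruthy include_ then
      headers.filter (fun header => (include_.getD []).any (fun prefix_ => PySem.Str.startswith header prefix_))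
    else headers
  -- if exclude: headers = [h for h in headers if not any(h.startswith(p) for p in exclude)]
  let headers2 :=
    if pvTruthy exclude then
      headers1.filter (fun header => !((exclude.getD []).any (fun prefix_ => PySem.Str.startswith header prefix_)))
    else headers1
  headers2

-- ===== PORT B =====
def filter_headers_by_prefix_py_alt (headers : List String) (include_ : Option (List String)) (exclude : Option (List String)) : List String :=
  let doInclude := pvTruthy include_
  let doExclude := pvTruthy exclude
  headers.foldl (fun result header =>
    if doInclude && !((include_.getD []).any (fun p => PySem.Str.startswith header p)) then result
    else if doExclude && (exclude.getD []).any (fun p => PySem.Str.startswith header p) then result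
    else result ++ [header]) []

-- ===== PRECONDITION & SPEC =====
def Spec_filter_headers_by_prefix_py (headers : List String) (include_ : Option (List String)) (exclude : Option (List String)) (out : List String) : Prop := out = filter_headers_by_prefix_py_alt headers include_ exclude
instance (headers : List String) (include_ : Option (List String)) (exclude : Option (List String)) (out : List String) : Decidable (Spec_filter_headers_by_prefix_py headers include_ exclude out) := by unfold Spec_filter_headers_by_prefix_py; infer_instance

-- ===== CLAIM (what is proved, stated in full; the proofs are below) =====
def Claim_equal_filter_headers_by_prefix_py : Prop := ∀ (headers : List String) (include_ : Option (List String)) (exclude : Option (List String)), Dom_filter_headers_by_prefix_py headers include_ exclude → Spec_filter_headers_by_prefix_py headers include_ exclude (filter_headers_by_prefix_py headers include_ exclude)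

-- ===== LEMMAS AND PROOFS =====

-- B's loop keeps exactly the headers passing both tests, in order
theorem alt_foldl_eq (f g : String → Bool) :
    ∀ (l acc : List String),
      l.foldl (fun result header =>
        if f header then result
        else if g header then result
        else result ++ [header]) acc
      = acc ++ l.filter (fun h => !f h && !g h) := by
  intro l
  induction l with
  | nil => intro acc; simp
  | cons h t ih =>
    intro acc
    simp only [List.foldl, List.filter]
    by_cases hf : f h <;> by_cases hg : g h <;> simp [hf, hg, ih]

-- ===== VERDICT (by name: the statement is the Claim_ definition above) =====
theorem filter_headers_by_prefix_py_spec : Claim_equal_filter_headers_by_prefix_py := by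
  intro headers include_ exclude _
  unfold Spec_filter_headers_by_prefix_py filter_headers_by_prefix_py filter_headers_by_prefix_py_alt
  rw [alt_foldl_eq]
  by_cases hi : pvTruthy include_ <;> by_cases he : pvTruthy exclude <;>
    simp [hi, he, List.filter_filter, Bool.and_comm]
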